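-- pv_equiv track=rewrite | github.com/jano1906ideas/dino | mask_const.py | _generate_ids
-- ===== SOURCE A (Python) =====
-- def _generate_ids(xs, ys):
--     ids = []
--     W = sum(xs)
--     y_offset = 0
--     for y in ys:
--         x_offset = 0
--         for x in xs:
--             id = [x_+y_*W for y_ in range(y_offset, y_offset+y) for x_ in range(x_offset, x_offset+x)]
--             ids.append(id)
--             x_offset += x
--         y_offset += y
--     return ids
-- ===== SOURCE B (Python) =====
-- def _generate_ids(xs, ys):
--     # Build blocks column-major (one list of blocks per x-strip), then
--     # interleave the columns back into A's row-major block order.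
--     W = sum(xs)
--     cols = []
--     x_off = 0
--     for x in xs:
--         col = []
--         y_off = 0
--         for y in ys:
--             block = []
--             for r in range(y_off, y_off + y):
--                 block.extend(range(x_off + r * W, x_off + x + r * W))
--             col.append(block)
--             y_off += y
--         cols.append(col)
--         x_off += x
--     return [col[j] for j in range(len(ys)) for col in cols]
-- ===== Notes on version B (the rewrite author's own statement) =====
-- stated objective: alternative
-- what changed: B traverses the blocks in the transposed (column-major) order, building one list of blocks per x-strip with row-wise contiguous ranges, and then a separate final pass interleaves the columns back into row-major block order, instead of A's single row-major double loop with a per-element arithmetic comprehension.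
import Mathlib
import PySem

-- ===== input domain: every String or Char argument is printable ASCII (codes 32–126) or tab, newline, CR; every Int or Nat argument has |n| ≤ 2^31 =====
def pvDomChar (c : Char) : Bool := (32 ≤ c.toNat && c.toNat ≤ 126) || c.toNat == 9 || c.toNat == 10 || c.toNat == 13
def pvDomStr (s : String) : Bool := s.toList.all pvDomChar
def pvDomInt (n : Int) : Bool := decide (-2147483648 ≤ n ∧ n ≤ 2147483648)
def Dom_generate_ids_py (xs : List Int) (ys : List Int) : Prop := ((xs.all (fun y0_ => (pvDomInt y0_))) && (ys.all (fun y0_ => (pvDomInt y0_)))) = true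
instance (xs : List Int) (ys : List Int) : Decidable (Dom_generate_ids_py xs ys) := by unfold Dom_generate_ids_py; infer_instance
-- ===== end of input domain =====

-- B builds the blocks in transposed (column-major) order — one list of blocks per
-- x-strip, rows as contiguous ranges — and a separate final pass interleaves the
-- columns back into row-major block order (objective: alternative, same cost).

-- ===== PORT A =====
def generate_ids_py (xs : List Int) (ys : List Int) : List (List Int) :=
  (ys.foldl (fun (acc : List (List Int) × Int) y =>
      ((xs.foldl (fun (acc2 : List (List Int) × Int) x =>
          (acc2.1 ++ [(PySem.List.pyRange acc.2 (acc.2 + y) 1).flatMap (fun y_ =>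
              (PySem.List.pyRange acc2.2 (acc2.2 + x) 1).map (fun x_ => x_ + y_ * xs.sum))],
           acc2.2 + x)) (acc.1, 0)).1,
       acc.2 + y)) (([] : List (List Int)), (0 : Int))).1

-- ===== PORT B =====
-- cols: for each x-strip (outer loop over xs) the list of its blocks down the ys
-- (inner loop), each block extended row by row with a contiguous range; the final
-- comprehension [col[j] for j in range(len(ys)) for col in cols] interleaves.
def pvCols (xs : List Int) (ys : List Int) : List (List (List Int)) :=
  (xs.foldl (fun (acc : List (List (List Int)) × Int) x =>
      (acc.1 ++ [(ys.foldl (fun (acc2 : List (List Int) × Int) y =>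
          (acc2.1 ++ [(PySem.List.pyRange acc2.2 (acc2.2 + y) 1).foldl
              (fun b r => b ++ PySem.List.pyRange (acc.2 + r * xs.sum) (acc.2 + x + r * xs.sum) 1) []],
           acc2.2 + y)) (([] : List (List Int)), (0 : Int))).1],
       acc.2 + x)) (([] : List (List (List Int))), (0 : Int))).1

def generate_ids_py_alt (xs : List Int) (ys : List Int) : List (List Int) :=
  (PySem.List.pyRange 0 (ys.length : Int) 1).flatMap (fun j =>
    (pvCols xs ys).map (fun col => PySem.List.pyGetD col j []))

-- ===== PRECONDITION & SPEC =====
def Spec_generate_ids_py (xs : List Int) (ys : List Int) (out : List (List Int)) : Prop := out = generate_ids_py_alt xs ys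
instance (xs : List Int) (ys : List Int) (out : List (List Int)) : Decidable (Spec_generate_ids_py xs ys out) := by unfold Spec_generate_ids_py; infer_instance

-- ===== CLAIM (what is proved, stated in full; the proofs are below) =====
def Claim_equal_generate_ids_py : Prop := ∀ (xs : List Int) (ys : List Int), Dom_generate_ids_py xs ys → Spec_generate_ids_py xs ys (generate_ids_py xs ys)

-- ===== LEMMAS AND PROOFS =====

/-- Consecutive boundary pairs (block spans) of `zs` starting at `s`. -/
def pvSpansFrom (s : Int) : List Int → List (Int × Int)
  | [] => []
  | z :: zs => (s, s + z) :: pvSpansFrom (s + z) zs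

/-- One block's flat id list, B's shape: row-wise contiguous ranges. -/
def pvBlk (W r0 r1 c0 c1 : Int) : List Int :=
  (PySem.List.pyRange r0 r1 1).foldl
    (fun b r => b ++ PySem.List.pyRange (c0 + r * W) (c1 + r * W) 1) []

theorem pvSpansFrom_length (zs : List Int) : ∀ s : Int, (pvSpansFrom s zs).length = zs.length := by
  induction zs with
  | nil => intro s; rfl
  | cons z zs ih => intro s; simp [pvSpansFrom, ih]

/-- shift a step-1 range. -/
theorem pvRange_shift (a b c : Int) :
    (PySem.List.pyRange a b 1).map (fun x => x + c) = PySem.List.pyRange (a + c) (b + c) 1 := by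
  rw [PySem.List.pyRange_one, PySem.List.pyRange_one, List.map_map]
  have h : b + c - (a + c) = b - a := by ring
  rw [h]
  apply List.map_congr_left
  intro k _
  simp only [Function.comp]
  ring

/-- A's comprehension for one block equals the row-wise range extension. -/
theorem pvBlock_eq (W yoff y xoff x : Int) :
    (PySem.List.pyRange yoff (yoff + y) 1).flatMap (fun y_ =>
        (PySem.List.pyRange xoff (xoff + x) 1).map (fun x_ => x_ + y_ * W))
      = pvBlk W yoff (yoff + y) xoff (xoff + x) := by
  rw [pvBlk, PySem.List.foldl_append_eq_flatMap]
  simp only [List.nil_append]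
  have h : (fun y_ => (PySem.List.pyRange xoff (xoff + x) 1).map (fun x_ => x_ + y_ * W))
      = (fun r => PySem.List.pyRange (xoff + r * W) (xoff + x + r * W) 1) :=
    funext fun r => pvRange_shift xoff (xoff + x) (r * W)
  rw [h]

/-- A's inner loop over xs, from an arbitrary accumulator and x-offset. -/
theorem pvInnerA (W yoff y : Int) (xs : List Int) : ∀ (ids0 : List (List Int)) (xoff : Int),
    (xs.foldl (fun (acc2 : List (List Int) × Int) x =>
        (acc2.1 ++ [(PySem.List.pyRange yoff (yoff + y) 1).flatMap (fun y_ =>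
            (PySem.List.pyRange acc2.2 (acc2.2 + x) 1).map (fun x_ => x_ + y_ * W))],
         acc2.2 + x)) (ids0, xoff)).1
      = ids0 ++ (pvSpansFrom xoff xs).map (fun q => pvBlk W yoff (yoff + y) q.1 q.2) := by
  induction xs with
  | nil => intro ids0 xoff; simp [pvSpansFrom]
  | cons x xs ih =>
    intro ids0 xoff
    simp only [List.foldl_cons, pvSpansFrom, List.map_cons]
    rw [ih, pvBlock_eq, List.append_assoc]
    rfl

/-- A's outer loop over ys. -/
theorem pvOuterA (W : Int) (xs : List Int) (ys : List Int) : ∀ (ids0 : List (List Int)) (yoff : Int),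
    (ys.foldl (fun (acc : List (List Int) × Int) y =>
        ((xs.foldl (fun (acc2 : List (List Int) × Int) x =>
            (acc2.1 ++ [(PySem.List.pyRange acc.2 (acc.2 + y) 1).flatMap (fun y_ =>
                (PySem.List.pyRange acc2.2 (acc2.2 + x) 1).map (fun x_ => x_ + y_ * W))],
             acc2.2 + x)) (acc.1, 0)).1,
         acc.2 + y)) (ids0, yoff)).1
      = ids0 ++ (pvSpansFrom yoff ys).flatMap (fun p =>
          (pvSpansFrom 0 xs).map (fun q => pvBlk W p.1 p.2 q.1 q.2)) := by
  induction ys with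
  | nil => intro ids0 yoff; simp [pvSpansFrom]
  | cons y ys ih =>
    intro ids0 yoff
    simp only [List.foldl_cons, pvSpansFrom, List.flatMap_cons]
    rw [ih, pvInnerA, List.append_assoc]

/-- B's inner loop: one x-strip's column of blocks down the ys. -/
theorem pvColInner (W xoff x : Int) (ys : List Int) : ∀ (col0 : List (List Int)) (yoff : Int),
    (ys.foldl (fun (acc2 : List (List Int) × Int) y =>
        (acc2.1 ++ [(PySem.List.pyRange acc2.2 (acc2.2 + y) 1).foldl
            (fun b r => b ++ PySem.List.pyRange (xoff + r * W) (xoff + x + r * W) 1) []],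
         acc2.2 + y)) (col0, yoff)).1
      = col0 ++ (pvSpansFrom yoff ys).map (fun p => pvBlk W p.1 p.2 xoff (xoff + x)) := by
  induction ys with
  | nil => intro col0 yoff; simp [pvSpansFrom]
  | cons y ys ih =>
    intro col0 yoff
    simp only [List.foldl_cons, pvSpansFrom, List.map_cons]
    rw [ih, List.append_assoc]
    rfl

/-- B's outer loop over xs: the transposed table of blocks. -/
theorem pvColsB (W : Int) (xs ys : List Int) : ∀ (cols0 : List (List (List Int))) (xoff : Int),
    (xs.foldl (fun (acc : List (List (List Int)) × Int) x =>
        (acc.1 ++ [(ys.foldl (fun (acc2 : List (List Int) × Int) y =>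
            (acc2.1 ++ [(PySem.List.pyRange acc2.2 (acc2.2 + y) 1).foldl
                (fun b r => b ++ PySem.List.pyRange (acc.2 + r * W) (acc.2 + x + r * W) 1) []],
             acc2.2 + y)) (([] : List (List Int)), (0 : Int))).1],
         acc.2 + x)) (cols0, xoff)).1
      = cols0 ++ (pvSpansFrom xoff xs).map (fun q =>
          (pvSpansFrom 0 ys).map (fun p => pvBlk W p.1 p.2 q.1 q.2)) := by
  induction xs with
  | nil => intro cols0 xoff; simp [pvSpansFrom]
  | cons x xs ih =>
    intro cols0 xoff
    simp only [List.foldl_cons, pvSpansFrom, List.map_cons]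
    rw [ih, pvColInner, List.append_assoc]
    simp

/-- flatMap over a list = flatMap over the range of its indices with getD. -/
theorem pvFlatMapRange {α β : Type} (d : α) (G : α → List β) :
    ∀ (l : List α), (List.range l.length).flatMap (fun k => G (l.getD k d)) = l.flatMap G := by
  intro l
  induction l with
  | nil => simp
  | cons a l ih =>
    rw [List.length_cons, List.range_succ_eq_map]
    simp only [List.flatMap_cons, List.flatMap_map, List.getD_cons_zero, List.getD_cons_succ]
    rw [ih]

/-- Interleaving the transposed table restores A's row-major block order. -/
theorem pvAssemble (W : Int) (xs ys : List Int) :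
    (PySem.List.pyRange 0 (ys.length : Int) 1).flatMap (fun j =>
        ((pvSpansFrom 0 xs).map (fun q =>
            (pvSpansFrom 0 ys).map (fun p => pvBlk W p.1 p.2 q.1 q.2))).map
          (fun col => PySem.List.pyGetD col j []))
      = (pvSpansFrom 0 ys).flatMap (fun p =>
          (pvSpansFrom 0 xs).map (fun q => pvBlk W p.1 p.2 q.1 q.2)) := by
  rw [PySem.List.pyRange_zero_natCast, List.flatMap_map,
      ← pvFlatMapRange ((0, 0) : Int × Int)
        (fun p => (pvSpansFrom 0 xs).map (fun q => pvBlk W p.1 p.2 q.1 q.2)) (pvSpansFrom 0 ys),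
      pvSpansFrom_length]
  apply List.flatMap_congr
  intro k hk
  rw [List.mem_range] at hk
  simp only [List.map_map, PySem.List.pyGetD_natCast]
  apply List.map_congr_left
  intro q _
  simp only [Function.comp_apply]
  have hk' : k < ((pvSpansFrom 0 ys).map (fun p => pvBlk W p.1 p.2 q.1 q.2)).length := by
    rw [List.length_map, pvSpansFrom_length]; exact hk
  have hk'' : k < (pvSpansFrom 0 ys).length := by rw [pvSpansFrom_length]; exact hk
  rw [List.getD_eq_getElem _ _ hk', List.getElem_map, ← List.getD_eq_getElem _ ((0,0) : Int × Int) hk'']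

-- ===== VERDICT (by name: the statement is the Claim_ definition above) =====
theorem generate_ids_py_spec : Claim_equal_generate_ids_py := by
  intro xs ys _
  unfold Spec_generate_ids_py generate_ids_py generate_ids_py_alt pvCols
  rw [pvOuterA, pvColsB]
  simp only [List.nil_append]
  rw [pvAssemble]
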